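-- pv_equiv track=rewrite | github.com/Bogdanp/molten | molten/router.py | tokenize_route_template
-- ===== SOURCE A (Python) =====
-- from typing import Any, Callable, Dict, Iterator, List, Optional, Pattern, Set, Tuple, Union
--
-- def tokenize_route_template(template: str) -> Iterator[Tuple[str, str]]:
--     """Convert a route template into a stream of tokens.
--     """
--     k, i = 0, 0
--
--     while i < len(template):
--         if template[i] == "{":
--             yield "chunk", template[k:i]
--
--             k = i
--             kind = "binding"
--             if template[i:i + 2] == "{*":
--                 kind = "glob"
--                 i += 1
--
--             for j in range(i + 1, len(template)):
--                 if template[j] == "}":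
--                     yield kind, template[i + 1:j]
--                     k = j + 1
--                     i = j
--                     break
--             else:
--                 raise SyntaxError(f"unmatched {{ in route template {template!r}")
--
--         i += 1
--
--     if k != i:
--         yield "chunk", template[k:i]
-- ===== SOURCE B (Python) =====
-- def tokenize_route_template(template: str):
--     """Convert a route template into a stream of tokens.
--
--     Staged: split the template on "{" once, then fold over the pieces,
--     re-gluing pieces whose binding name itself contains "{".
--     """
--     parts = template.split("{")
--     chunk = parts[0]
--     i = 1
--     while i < len(parts):
--         yield "chunk", chunk
--         part = parts[i]
--         i += 1
--         if part.startswith("*"):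
--             kind, part = "glob", part[1:]
--         else:
--             kind = "binding"
--         pieces = []
--         while "}" not in part:
--             if i >= len(parts):
--                 raise SyntaxError(f"unmatched {{ in route template {template!r}")
--             pieces.append(part)
--             part = parts[i]
--             i += 1
--         name, _, chunk = part.partition("}")
--         pieces.append(name)
--         yield kind, "{".join(pieces)
--     if chunk:
--         yield "chunk", chunk
-- ===== Notes on version B (the rewrite author's own statement) =====
-- stated objective: faster
-- what changed: B replaces A's character-by-character index scan (with an inner for/else search for the closing brace) by a staged algorithm: split the template on '{' once with str.split, then fold over the resulting pieces, re-gluing pieces whose binding name itself contains '{'.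
-- outside the precondition, e.g. on tokenize_route_template('{'): A raises SyntaxError, B raises SyntaxError
import Mathlib
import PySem

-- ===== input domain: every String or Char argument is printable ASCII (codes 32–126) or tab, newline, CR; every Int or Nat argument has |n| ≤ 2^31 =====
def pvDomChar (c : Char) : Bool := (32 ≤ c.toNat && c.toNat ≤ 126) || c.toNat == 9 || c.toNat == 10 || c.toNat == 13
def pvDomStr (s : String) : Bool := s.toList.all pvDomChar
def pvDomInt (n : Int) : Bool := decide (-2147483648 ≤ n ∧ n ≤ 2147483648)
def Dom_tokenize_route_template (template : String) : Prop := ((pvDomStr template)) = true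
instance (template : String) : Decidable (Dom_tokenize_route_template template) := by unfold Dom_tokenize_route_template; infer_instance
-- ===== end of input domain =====

-- B replaces A's char-by-char index scan by a staged algorithm: split the template on "{"
-- once, then fold over the pieces, re-gluing pieces whose binding name contains "{"; the
-- timing run measured B faster (constant factor: one C-level str.split + slicing instead
-- of a per-character Python loop). Both Pythons are generators; the token stream (and the
-- lazily raised SyntaxError, outside Pre_) is what is compared.

-- s[a:b] as a char list (0 ≤ a ≤ b; both Pythons slice only this way)
def pySub (s : List Char) (a b : Nat) : List Char := (s.drop a).take (b - a)

-- A's inner 'for j in range(i+1, len(template))' scan for a char, as an index search: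
-- first index m ≥ j with s[m] = c
def findChar (s : List Char) (c : Char) (j : Nat) : Option Nat :=
  if h : j < s.length then
    if s[j] = c then some j else findChar s c (j + 1)
  else none
termination_by s.length - j
decreasing_by exact Nat.sub_succ_lt_self s.length j h

-- ===== PORT A =====
-- fuel = remaining loop iterations (i only grows; s.length + 1 - i suffices): a totality
-- guard only, the Python while-loop needs none
def tokA (s : List Char) (fuel : Nat) (k i : Nat) : List (String × String) :=
  match fuel with
  | 0 => []
  | fuel + 1 =>
    if h : i < s.length then
      if s[i] = '{' then
        -- yield "chunk", template[k:i]; kind/glob; inner scan for '}' (for/else)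
        if hg : List.take 2 (List.drop i s) = ['{', '*'] then
          match findChar s '}' (i + 2) with
          | some j =>
              ("chunk", String.ofList (pySub s k i)) ::
              ("glob", String.ofList (pySub s (i + 2) j)) :: tokA s fuel (j + 1) (j + 1)
          | none => [("chunk", String.ofList (pySub s k i))]  -- Python raises SyntaxError here (outside Pre_)
        else
          match findChar s '}' (i + 1) with
          | some j =>
              ("chunk", String.ofList (pySub s k i)) ::
              ("binding", String.ofList (pySub s (i + 1) j)) :: tokA s fuel (j + 1) (j + 1)
          | none => [("chunk", String.ofList (pySub s k i))]  -- Python raises SyntaxError here (outside Pre_)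
      else tokA s fuel k (i + 1)
    else
      if k ≠ i then [("chunk", String.ofList (pySub s k i))] else []

def tokenize_route_template (template : String) : List (String × String) :=
  tokA template.toList (template.toList.length + 1) 0 0

-- ===== PORT B =====
-- '"}" in part' + 'part.partition("}")' combined: none = '}' not in s, otherwise the
-- (before, after) pair around the first '}' (exact for a single-char separator)
def pyPartition (sep : Char) (s : List Char) : Option (List Char × List Char) :=
  match s with
  | [] => none
  | c :: cs =>
    if c = sep then some ([], cs)
    else match pyPartition sep cs with
      | some (a, b) => some (c :: a, b)
      | none => none

theorem pyPartition_snd_lt (sep : Char) (s : List Char) (a b : List Char)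
    (h : pyPartition sep s = some (a, b)) : b.length < s.length := by
  match s with
  | [] => simp [pyPartition] at h
  | c :: cs =>
    rw [pyPartition] at h
    split at h
    · cases h; simp
    · cases hr : pyPartition sep cs with
      | none => rw [hr] at h; cases h
      | some p =>
        rw [hr] at h
        cases h
        have := pyPartition_snd_lt sep cs p.1 p.2 (by rw [hr])
        simp; omega

-- template.split("{") (exact for a single-char separator)
def pySplit (sep : Char) (s : List Char) : List (List Char) :=
  match hp : pyPartition sep s with
  | none => [s]
  | some (a, b) => a :: pySplit sep b
termination_by s.length
decreasing_by exact pyPartition_snd_lt sep s a b hp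

-- B's inner 'while "}" not in part' loop: consume further split pieces (re-inserting the
-- '{' that split removed) until a piece containing '}' is found; returns
-- (joined name, chunk after the '}', remaining pieces); none = raise SyntaxError
def scanName (part : List Char) (rest : List (List Char)) :
    Option (List Char × List Char × List (List Char)) :=
  match pyPartition '}' part with
  | some (name, after) => some (name, after, rest)
  | none =>
    match rest with
    | [] => none
    | p :: rs =>
      match scanName p rs with
      | some (nm, after, rs') => some (part ++ '{' :: nm, after, rs')
      | none => none

-- fuel = remaining pieces + 1 (each iteration consumes at least one piece): totality guard
def tokBLoop (fuel : Nat) (chunk : List Char) (rest : List (List Char)) :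
    List (String × String) :=
  match fuel with
  | 0 => []
  | fuel + 1 =>
    match rest with
    | [] => if chunk ≠ [] then [("chunk", String.ofList chunk)] else []
    | part :: rs =>
      -- if part.startswith("*"): kind, part = "glob", part[1:] else: kind = "binding"
      let kc : String × List Char :=
        if part.head? = some '*' then ("glob", part.tail) else ("binding", part)
      match scanName kc.2 rs with
      | none => [("chunk", String.ofList chunk)]  -- Python yields this chunk, then raises (outside Pre_)
      | some (name, after, rs') =>
          ("chunk", String.ofList chunk) :: (kc.1, String.ofList name) ::
          tokBLoop fuel after rs'

def tokenize_route_template_alt (template : String) : List (String × String) :=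
  match pySplit '{' template.toList with
  | [] => []  -- unreachable: split never returns an empty list
  | chunk :: rest => tokBLoop (rest.length + 1) chunk rest

-- ===== PRECONDITION & SPEC =====
-- Pre_ excludes exactly the templates with an unmatched '{' (a '{' with no '}' after it),
-- on which Python A raises SyntaxError (after yielding the tokens up to that brace).
def Pre_tokenize_route_template (template : String) : Prop :=
  ∀ p, p < template.toList.length → template.toList.getD p ' ' = '{' →
    ∃ q, q < template.toList.length ∧ p < q ∧ template.toList.getD q ' ' = '}'
instance (template : String) : Decidable (Pre_tokenize_route_template template) := by
  unfold Pre_tokenize_route_template; infer_instance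

def pvWitness_tokenize_route_template : String := "a{b}"

def Spec_tokenize_route_template (template : String) (out : List (String × String)) : Prop := out = tokenize_route_template_alt template
instance (template : String) (out : List (String × String)) : Decidable (Spec_tokenize_route_template template out) := by unfold Spec_tokenize_route_template; infer_instance

-- ===== CLAIM (what is proved, stated in full; the proofs are below) =====
def Claim_equal_tokenize_route_template : Prop := ∀ (template : String), Dom_tokenize_route_template template → Pre_tokenize_route_template template → Spec_tokenize_route_template template (tokenize_route_template template)

-- ===== LEMMAS AND PROOFS =====

-- ---- proof-side intermediate: A's token stream phrased as find-jumps over the string ----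
def tokF (s : List Char) (fuel : Nat) (last : Nat) : List (String × String) :=
  match fuel with
  | 0 => []
  | fuel + 1 =>
    match findChar s '{' last with
    | none =>
        let tail := pySub s last s.length
        if tail ≠ [] then [("chunk", String.ofList tail)] else []
    | some p =>
        match findChar s '}' (p + 1) with
        | none => [("chunk", String.ofList (pySub s last p))]
        | some q =>
            ("chunk", String.ofList (pySub s last p)) ::
            (if s[p + 1]? = some '*' then ("glob", String.ofList (pySub s (p + 2) q))
             else ("binding", String.ofList (pySub s (p + 1) q))) ::
            tokF s fuel (q + 1)

-- ---- findChar facts ----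
theorem findChar_bounds (s : List Char) (c : Char) (j q : Nat)
    (h : findChar s c j = some q) : j ≤ q ∧ q < s.length ∧ s[q]? = some c := by
  rw [findChar] at h
  split at h
  · next hj =>
    split at h
    · next hc =>
      cases h
      exact ⟨le_refl _, hj, by simp [List.getElem?_eq_getElem hj, hc]⟩
    · have := findChar_bounds s c (j + 1) q h
      exact ⟨by omega, this.2.1, this.2.2⟩
  · cases h
termination_by s.length - j

theorem findChar_none (s : List Char) (c : Char) (j : Nat)
    (h : ∀ m, j ≤ m → m < s.length → s[m]? ≠ some c) : findChar s c j = none := by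
  rw [findChar]
  split
  · next hj =>
    have hne : s[j] ≠ c := by
      intro hc
      exact h j (le_refl _) hj (by simp [List.getElem?_eq_getElem hj, hc])
    rw [if_neg hne]
    exact findChar_none s c (j + 1) (fun m hm hml => h m (by omega) hml)
  · rfl
termination_by s.length - j

theorem findChar_some (s : List Char) (c : Char) (j i : Nat) (hji : j ≤ i)
    (hi : i < s.length) (hc : s[i] = c)
    (h : ∀ m, j ≤ m → m < i → s[m]? ≠ some c) : findChar s c j = some i := by
  rw [findChar]
  rw [dif_pos (by omega : j < s.length)]
  rcases Nat.lt_or_ge j i with hlt | hge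
  · have hne : s[j] ≠ c := by
      intro hcj
      exact h j (le_refl _) hlt (by simp [List.getElem?_eq_getElem (by omega : j < s.length), hcj])
    rw [if_neg hne]
    exact findChar_some s c (j + 1) i (by omega) hi hc (fun m hm hml => h m (by omega) hml)
  · have hji' : j = i := by omega
    subst hji'
    rw [if_pos hc]
termination_by i - j

theorem tokF_case_none (s : List Char) (fuel last : Nat) (h : findChar s '{' last = none) :
    tokF s (fuel + 1) last =
      if pySub s last s.length ≠ [] then [("chunk", String.ofList (pySub s last s.length))] else [] := by
  simp only [tokF, h]

theorem tokF_case_some_none (s : List Char) (fuel last p : Nat)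
    (hp : findChar s '{' last = some p) (hq : findChar s '}' (p + 1) = none) :
    tokF s (fuel + 1) last = [("chunk", String.ofList (pySub s last p))] := by
  simp only [tokF, hp, hq]

theorem tokF_case_some_some (s : List Char) (fuel last p q : Nat)
    (hp : findChar s '{' last = some p) (hq : findChar s '}' (p + 1) = some q) :
    tokF s (fuel + 1) last =
      ("chunk", String.ofList (pySub s last p)) ::
      (if s[p + 1]? = some '*' then ("glob", String.ofList (pySub s (p + 2) q))
       else ("binding", String.ofList (pySub s (p + 1) q))) ::
      tokF s fuel (q + 1) := by
  simp only [tokF, hp, hq]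

-- ---- step 1: A's char scan equals the find-jump form ----
theorem tokA_eq_tokF (s : List Char) :
    ∀ (fa fb i k : Nat), k ≤ i → i ≤ s.length → s.length < i + fa → s.length < k + fb →
      (∀ m, k ≤ m → m < i → s[m]? ≠ some '{') → tokA s fa k i = tokF s fb k := by
  intro fa
  induction fa with
  | zero =>
    intro fb i k hki hil hfa hfb hinv
    exact ((by omega : False)).elim
  | succ fa ih =>
    intro fb i k hki hil hfa hfb hinv
    cases fb with
    | zero => exact ((by omega : False)).elim
    | succ fb =>
    simp only [tokA]
    by_cases hlt : i < s.length
    · rw [dif_pos hlt]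
      by_cases hbr : s[i] = '{'
      · -- A is at a '{'; the find-jump form's find("{", k) stops exactly here
        have hopen : findChar s '{' k = some i :=
          findChar_some s '{' k i hki hlt hbr hinv
        rw [if_pos hbr]
        -- relate A's glob test template[i:i+2] == "{*" with s[i+1:i+2] == "*"
        have hdrop : s.drop i = s[i] :: s.drop (i + 1) := List.drop_eq_getElem_cons hlt
        have hglob : (List.take 2 (List.drop i s) = ['{', '*']) ↔ s[i + 1]? = some '*' := by
          rw [hdrop, hbr, List.take_succ_cons]
          constructor
          · intro h
            have h1 : List.take 1 (s.drop (i + 1)) = ['*'] := (List.cons.injEq _ _ _ _ ▸ h).2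
            cases hd : s.drop (i + 1) with
            | nil => rw [hd] at h1; simp at h1
            | cons x xs =>
              rw [hd] at h1
              have hx : x = '*' := by simpa using h1
              have : (s.drop (i + 1)).head? = some '*' := by rw [hd, hx]; rfl
              simpa [List.head?_drop] using this
          · intro h
            have hl : i + 1 < s.length := (List.getElem?_eq_some_iff.mp h).1
            have hx : s[i + 1] = '*' := by
              have := List.getElem?_eq_getElem hl
              rw [h] at this
              exact (Option.some.inj this).symm
            rw [List.drop_eq_getElem_cons hl, hx]
            rfl
        by_cases hg : List.take 2 (List.drop i s) = ['{', '*']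
        · -- glob: A scans for '}' from i+2; the jump form from i+1, but s[i+1] = '*' ≠ '}'
          have hstar : s[i + 1]? = some '*' := hglob.mp hg
          have hl1 : i + 1 < s.length := (List.getElem?_eq_some_iff.mp hstar).1
          have hx : s[i + 1] = '*' := by
            have := List.getElem?_eq_getElem hl1
            rw [hstar] at this
            exact (Option.some.inj this).symm
          have hshift : findChar s '}' (i + 1) = findChar s '}' (i + 2) := by
            rw [findChar, dif_pos hl1, hx, if_neg (by decide)]
          rw [dif_pos hg]
          cases hf : findChar s '}' (i + 2) with
          | none => rw [tokF_case_some_none s fb k i hopen (hshift.trans hf)]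
          | some j =>
            have hb := findChar_bounds s '}' (i + 2) j hf
            rw [tokF_case_some_some s fb k i j hopen (hshift.trans hf), if_pos hstar]
            exact congrArg₂ _ rfl (congrArg₂ _ rfl
              (ih fb (j + 1) (j + 1) (le_refl _) (by omega) (by omega) (by omega) (by omega)))
        · -- binding
          have hstar : ¬ s[i + 1]? = some '*' := fun h => hg (hglob.mpr h)
          rw [dif_neg hg]
          cases hf : findChar s '}' (i + 1) with
          | none => rw [tokF_case_some_none s fb k i hopen hf]
          | some j =>
            have hb := findChar_bounds s '}' (i + 1) j hf
            rw [tokF_case_some_some s fb k i j hopen hf, if_neg hstar]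
            exact congrArg₂ _ rfl (congrArg₂ _ rfl
              (ih fb (j + 1) (j + 1) (le_refl _) (by omega) (by omega) (by omega) (by omega)))
      · -- not a brace: A steps i by one; the jump form's state is unchanged
        rw [if_neg hbr]
        exact ih (fb + 1) (i + 1) k (by omega) (by omega) (by omega) (by omega) (by
          intro m hm hml
          rcases Nat.lt_or_ge m i with h1 | h1
          · exact hinv m hm h1
          · have hmi : m = i := by omega
            subst hmi
            intro hc
            exact hbr (by
              have := List.getElem?_eq_getElem hlt
              rw [hc] at this
              exact (Option.some.inj this).symm))
    · -- loop exit (i = len): no '{' from k; tail chunk iff nonempty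
      have hie : i = s.length := by omega
      subst hie
      rw [dif_neg hlt]
      have hnone : findChar s '{' k = none :=
        findChar_none s '{' k (fun m hm hml => hinv m hm hml)
      rw [tokF_case_none s fb k hnone]
      have hps : pySub s k s.length = s.drop k :=
        List.take_of_length_le (by simp)
      rw [hps]
      by_cases hk : k = s.length
      · subst hk
        simp
      · have hne : s.drop k ≠ [] := by
          rw [ne_eq, List.drop_eq_nil_iff]
          omega
        rw [if_pos hk, if_pos hne, ← hps]

-- ---- pyPartition facts ----
theorem pyPartition_eq_some (c : Char) (s : List Char) :
    ∀ x y, pyPartition c s = some (x, y) → s = x ++ c :: y ∧ c ∉ x := by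
  induction s with
  | nil => intro x y h; simp [pyPartition] at h
  | cons d ds ih =>
    intro x y h
    rw [pyPartition] at h
    split at h
    · next hd => cases h; subst hd; simp
    · next hd =>
      cases hr : pyPartition c ds with
      | none => rw [hr] at h; cases h
      | some p =>
        rw [hr] at h
        cases h
        obtain ⟨h1, h2⟩ := ih p.1 p.2 (by rw [hr])
        constructor
        · rw [List.cons_append, ← h1]
        · simp only [List.mem_cons, not_or]
          exact ⟨fun hc => hd hc.symm, h2⟩

theorem pyPartition_eq_none (c : Char) (s : List Char) :
    pyPartition c s = none ↔ c ∉ s := by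
  induction s with
  | nil => simp [pyPartition]
  | cons d ds ih =>
    rw [pyPartition]
    constructor
    · intro h
      split at h
      · cases h
      · next hd =>
        cases hr : pyPartition c ds with
        | none =>
          simp only [List.mem_cons, not_or]
          exact ⟨fun hc => hd hc.symm, ih.mp hr⟩
        | some p => rw [hr] at h; cases h
    · intro h
      simp only [List.mem_cons, not_or] at h
      rw [if_neg (fun hc => h.1 hc.symm), ih.mpr h.2]

theorem pyPartition_append_some (c : Char) (a : List Char) :
    ∀ b x y, pyPartition c a = some (x, y) → pyPartition c (a ++ b) = some (x, y ++ b) := by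
  induction a with
  | nil => intro b x y h; simp [pyPartition] at h
  | cons d ds ih =>
    intro b x y h
    rw [pyPartition] at h
    rw [List.cons_append, pyPartition]
    split at h
    · next hd => cases h; rw [if_pos hd]
    · next hd =>
      rw [if_neg hd]
      cases hr : pyPartition c ds with
      | none => rw [hr] at h; cases h
      | some p =>
        rw [hr] at h
        cases h
        rw [ih b p.1 p.2 (by rw [hr])]

theorem pyPartition_append_none (c : Char) (a : List Char) (b : List Char)
    (h : pyPartition c a = none) :
    pyPartition c (a ++ b) = (pyPartition c b).map (fun p => (a ++ p.1, p.2)) := by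
  induction a with
  | nil => simp
  | cons d ds ih =>
    rw [pyPartition] at h
    rw [List.cons_append, pyPartition]
    split at h
    · cases h
    · next hd =>
      rw [if_neg hd]
      cases hr : pyPartition c ds with
      | none =>
        rw [ih hr]
        cases hb : pyPartition c b with
        | none => simp
        | some p => simp
      | some p => rw [hr] at h; cases h

-- ---- re-gluing the pieces that split('{') produced ----
def glueAux (c : Char) : List (List Char) → List Char
  | [] => []
  | x :: l => c :: (x ++ glueAux c l)

theorem pySplit_eq_none (c : Char) (s : List Char) (h : pyPartition c s = none) :
    pySplit c s = [s] := by
  rw [pySplit]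
  split <;> simp_all

theorem pySplit_eq_some (c : Char) (s : List Char) (x y : List Char)
    (h : pyPartition c s = some (x, y)) : pySplit c s = x :: pySplit c y := by
  rw [pySplit]
  split <;> simp_all

theorem pySplit_ne_nil (c : Char) (s : List Char) : pySplit c s ≠ [] := by
  rw [pySplit]
  split <;> simp

theorem pySplit_glue (c : Char) : ∀ n (s : List Char), s.length ≤ n →
    ∀ a l, pySplit c s = a :: l → a ++ glueAux c l = s := by
  intro n
  induction n with
  | zero =>
    intro s hs a l h
    have hs0 : s = [] := List.length_eq_zero_iff.mp (by omega)
    subst hs0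
    rw [pySplit_eq_none c [] (by simp [pyPartition])] at h
    cases h
    simp [glueAux]
  | succ n ih =>
    intro s hs a l h
    cases hp : pyPartition c s with
    | none =>
      rw [pySplit_eq_none c s hp] at h
      cases h
      simp [glueAux]
    | some p =>
      rw [pySplit_eq_some c s p.1 p.2 (by rw [hp])] at h
      obtain ⟨h1, h2⟩ := List.cons.injEq _ _ _ _ ▸ h
      subst h1
      obtain ⟨hseq, -⟩ := pyPartition_eq_some c s p.1 p.2 (by rw [hp])
      have hlt := pyPartition_snd_lt c s p.1 p.2 (by rw [hp])
      cases hl2 : pySplit c p.2 with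
      | nil => exact absurd hl2 (pySplit_ne_nil c p.2)
      | cons a2 l2 =>
        rw [hl2] at h2
        subst h2
        have := ih p.2 (by omega) a2 l2 hl2
        rw [show glueAux c (a2 :: l2) = c :: (a2 ++ glueAux c l2) from rfl, hseq, this]

theorem pySplit_no_sep (c : Char) : ∀ n (s : List Char), s.length ≤ n →
    ∀ x ∈ pySplit c s, c ∉ x := by
  intro n
  induction n with
  | zero =>
    intro s hs x hx
    have hs0 : s = [] := List.length_eq_zero_iff.mp (by omega)
    subst hs0
    rw [pySplit_eq_none c [] (by simp [pyPartition])] at hx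
    simp at hx
    subst hx
    simp
  | succ n ih =>
    intro s hs x hx
    cases hp : pyPartition c s with
    | none =>
      rw [pySplit_eq_none c s hp] at hx
      simp at hx
      subst hx
      exact (pyPartition_eq_none c _).mp hp
    | some p =>
      rw [pySplit_eq_some c s p.1 p.2 (by rw [hp])] at hx
      have hlt := pyPartition_snd_lt c s p.1 p.2 (by rw [hp])
      rcases List.mem_cons.mp hx with h1 | h1
      · subst h1
        exact (pyPartition_eq_some c s p.1 p.2 (by rw [hp])).2
      · exact ih p.2 (by omega) x h1

theorem pySplit_of_glue (c : Char) : ∀ (l : List (List Char)) (a : List Char),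
    c ∉ a → (∀ x ∈ l, c ∉ x) → pySplit c (a ++ glueAux c l) = a :: l := by
  intro l
  induction l with
  | nil =>
    intro a ha _
    rw [show glueAux c [] = [] from rfl, List.append_nil, pySplit_eq_none c a ((pyPartition_eq_none c a).mpr ha)]
  | cons x l2 ih =>
    intro a ha hl
    simp only [glueAux]
    have hpa : pyPartition c (a ++ c :: (x ++ glueAux c l2)) =
        some (a, x ++ glueAux c l2) := by
      rw [pyPartition_append_none c a _ ((pyPartition_eq_none c a).mpr ha)]
      rw [pyPartition]
      simp
    rw [pySplit_eq_some c _ a (x ++ glueAux c l2) hpa]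
    rw [ih x (hl x (by simp)) (fun y hy => hl y (by simp [hy]))]

-- ---- findChar ↔ pyPartition on suffixes ----
theorem findChar_partition_none (s : List Char) (c : Char) (j : Nat)
    (h : findChar s c j = none) : pyPartition c (s.drop j) = none := by
  rw [findChar] at h
  split at h
  · next hj =>
    rw [List.drop_eq_getElem_cons hj, pyPartition]
    split at h
    · cases h
    · next hne =>
      rw [if_neg hne, findChar_partition_none s c (j + 1) h]
  · next hj =>
    rw [List.drop_eq_nil_iff.mpr (by omega), pyPartition]
termination_by s.length - j

theorem findChar_partition_some (s : List Char) (c : Char) (j q : Nat)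
    (h : findChar s c j = some q) :
    pyPartition c (s.drop j) = some (pySub s j q, s.drop (q + 1)) := by
  have hb := findChar_bounds s c j q h
  rw [findChar] at h
  split at h
  · next hj =>
    rw [List.drop_eq_getElem_cons hj, pyPartition]
    split at h
    · next hc =>
      cases h
      rw [if_pos hc]
      simp [pySub]
    · next hne =>
      rw [if_neg hne, findChar_partition_some s c (j + 1) q h]
      have hq : j < q := by
        rcases Nat.lt_or_ge j q with h1 | h1
        · exact h1
        · have : j = q := by omega
          subst this
          exact absurd (by
            have := List.getElem?_eq_getElem hj
            rw [hb.2.2] at this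
            exact (Option.some.inj this).symm) hne
      have hsub : pySub s j q = s[j] :: pySub s (j + 1) q := by
        unfold pySub
        rw [List.drop_eq_getElem_cons hj]
        have he : q - j = (q - (j + 1)) + 1 := by omega
        rw [he, List.take_succ_cons]
      rw [hsub]
  · cases h
termination_by s.length - j

-- ---- scanName facts ----
theorem scanName_none_partition : ∀ (rest : List (List Char)) (part : List Char),
    scanName part rest = none → pyPartition '}' (part ++ glueAux '{' rest) = none := by
  intro rest
  induction rest with
  | nil =>
    intro part h
    rw [scanName.eq_def] at h
    simp only [glueAux, List.append_nil]
    cases hp : pyPartition '}' part with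
    | none => rfl
    | some pr => obtain ⟨nm, af⟩ := pr; simp [hp] at h
  | cons p rs ih =>
    intro part h
    rw [scanName.eq_def] at h
    cases hp : pyPartition '}' part with
    | some pr => obtain ⟨nm, af⟩ := pr; simp [hp] at h
    | none =>
      simp only [hp] at h
      simp only [glueAux]
      rw [pyPartition_append_none '}' part _ hp, pyPartition, if_neg (by decide)]
      cases hs : scanName p rs with
      | some v => obtain ⟨nm, af, rs2⟩ := v; simp [hs] at h
      | none => rw [ih p hs]; rfl

theorem scanName_some_partition : ∀ (rest : List (List Char)) (part n a : List Char)
    (rs' : List (List Char)), scanName part rest = some (n, a, rs') →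
    pyPartition '}' (part ++ glueAux '{' rest) = some (n, a ++ glueAux '{' rs') ∧
    rs'.length ≤ rest.length ∧
    (('{' ∉ part ∧ ∀ x ∈ rest, '{' ∉ x) → ('{' ∉ a ∧ ∀ x ∈ rs', '{' ∉ x)) := by
  intro rest
  induction rest with
  | nil =>
    intro part n a rs' h
    rw [scanName.eq_def] at h
    cases hp : pyPartition '}' part with
    | none => simp [hp] at h
    | some pr =>
      obtain ⟨nm, af⟩ := pr
      simp only [hp, Option.some.injEq, Prod.mk.injEq] at h
      obtain ⟨h1, h2, h3⟩ := h
      subst h1; subst h2; subst h3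
      refine ⟨?_, le_refl _, ?_⟩
      · simp only [glueAux, List.append_nil]
        rw [hp]
      · intro ⟨hpart, _⟩
        obtain ⟨hseq, -⟩ := pyPartition_eq_some '}' part nm af (by rw [hp])
        exact ⟨fun hc => hpart (by rw [hseq]; simp [hc]), by simp⟩
  | cons p rs ih =>
    intro part n a rs' h
    rw [scanName.eq_def] at h
    cases hp : pyPartition '}' part with
    | some pr =>
      obtain ⟨nm, af⟩ := pr
      simp only [hp, Option.some.injEq, Prod.mk.injEq] at h
      obtain ⟨h1, h2, h3⟩ := h
      subst h1; subst h2; subst h3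
      refine ⟨?_, by simp, ?_⟩
      · rw [pyPartition_append_some '}' part _ nm af hp]
      · intro ⟨hpart, hrest⟩
        obtain ⟨hseq, -⟩ := pyPartition_eq_some '}' part nm af (by rw [hp])
        exact ⟨fun hc => hpart (by rw [hseq]; simp [hc]), hrest⟩
    | none =>
      simp only [hp] at h
      cases hs : scanName p rs with
      | none => simp [hs] at h
      | some v =>
        obtain ⟨nm, af, rs2⟩ := v
        simp only [hs, Option.some.injEq, Prod.mk.injEq] at h
        obtain ⟨h1, h2, h3⟩ := h
        subst h1; subst h2; subst h3
        obtain ⟨ih1, ih2, ih3⟩ := ih p nm af rs2 hs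
        refine ⟨?_, by simp; omega, ?_⟩
        · simp only [glueAux]
          rw [pyPartition_append_none '}' part _ hp, pyPartition, if_neg (by decide), ih1]
          simp
        · intro ⟨_, hrest⟩
          exact ih3 ⟨hrest p (by simp), fun x hx => hrest x (by simp [hx])⟩

theorem scanName_cons_star (t : List Char) (rest : List (List Char)) :
    scanName ('*' :: t) rest =
      (scanName t rest).map (fun v => ('*' :: v.1, v.2.1, v.2.2)) := by
  conv_lhs => rw [scanName.eq_def]
  conv_rhs => rw [scanName.eq_def]
  rw [pyPartition, if_neg (by decide)]
  cases hp : pyPartition '}' t with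
  | some pr => obtain ⟨nm, af⟩ := pr; simp [hp]
  | none =>
    simp only [hp]
    cases rest with
    | nil => rfl
    | cons p rs =>
      cases hs : scanName p rs with
      | none => simp [hs]
      | some v => obtain ⟨nm, af, rs2⟩ := v; simp [hs]

-- ---- step 2: the find-jump form equals B's split-based fold ----
theorem tokF_eq_tokBLoop (s : List Char) :
    ∀ (fa fb last : Nat) (chunk : List Char) (rest : List (List Char)),
      last ≤ s.length → s.length < last + fa → rest.length < fb →
      pySplit '{' (s.drop last) = chunk :: rest →
      tokF s fa last = tokBLoop fb chunk rest := by
  intro fa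
  induction fa with
  | zero =>
    intro fb last chunk rest h1 h2 h3 h4
    exact ((by omega : False)).elim
  | succ fa ih =>
    intro fb last chunk rest h1 h2 h3 h4
    cases fb with
    | zero => exact ((by omega : False)).elim
    | succ fb =>
    cases hfc : findChar s '{' last with
    | none =>
      -- no '{' from last: the split of the suffix is a single piece
      have hpn := findChar_partition_none s '{' last hfc
      rw [pySplit_eq_none '{' _ hpn] at h4
      obtain ⟨hc, hr⟩ := List.cons.injEq _ _ _ _ ▸ h4
      subst hc
      rw [tokF_case_none s fa last hfc]
      rw [← hr]
      simp only [tokBLoop]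
      have hps : pySub s last s.length = s.drop last :=
        List.take_of_length_le (by simp)
      rw [hps]
    | some p =>
      have hpb := findChar_bounds s '{' last p hfc
      have hps := findChar_partition_some s '{' last p hfc
      rw [pySplit_eq_some '{' _ _ _ hps] at h4
      obtain ⟨hc, hr⟩ := List.cons.injEq _ _ _ _ ▸ h4
      subst hc
      -- the tail of the split is nonempty: head piece 'part', remaining pieces 'rs'
      cases hsp : pySplit '{' (s.drop (p + 1)) with
      | nil => exact absurd hsp (pySplit_ne_nil '{' _)
      | cons part rs =>
        rw [hsp] at hr
        subst hr
        have hglue : part ++ glueAux '{' rs = s.drop (p + 1) :=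
          pySplit_glue '{' (s.drop (p + 1)).length _ le_rfl part rs hsp
        have hnosep : ∀ x ∈ part :: rs, '{' ∉ x :=
          fun x hx => pySplit_no_sep '{' (s.drop (p + 1)).length _ le_rfl x (hsp ▸ hx)
        simp only [tokBLoop]
        by_cases hstar : s[p + 1]? = some '*'
        · -- glob piece: s[p+1] = '*', so part = '*' :: t
          have hl1 : p + 1 < s.length := (List.getElem?_eq_some_iff.mp hstar).1
          have hx1 : s[p + 1] = '*' := by
            have := List.getElem?_eq_getElem hl1
            rw [hstar] at this
            exact (Option.some.inj this).symm
          have hdrop1 : s.drop (p + 1) = '*' :: s.drop (p + 2) := by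
            rw [List.drop_eq_getElem_cons hl1, hx1]
          obtain ⟨t, ht⟩ : ∃ t, part = '*' :: t := by
            cases part with
            | nil =>
              exfalso
              rw [List.nil_append] at hglue
              cases rs with
              | nil => rw [glueAux] at hglue; rw [hdrop1] at hglue; cases hglue
              | cons y l =>
                rw [glueAux] at hglue
                rw [hdrop1] at hglue
                have := (List.cons.injEq _ _ _ _ ▸ hglue).1
                cases this
            | cons c0 t =>
              refine ⟨t, ?_⟩
              rw [List.cons_append] at hglue
              rw [hdrop1] at hglue
              have := (List.cons.injEq _ _ _ _ ▸ hglue).1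
              rw [this]
          subst ht
          have hhead : ('*' :: t).head? = some '*' := rfl
          rw [hhead, if_pos rfl]
          simp only [List.tail_cons]
          cases hq : findChar s '}' (p + 1) with
          | none =>
            -- unmatched '{': both yield the chunk before it and stop
            have hqn := findChar_partition_none s '}' (p + 1) hq
            rw [← hglue] at hqn
            have hscn : scanName ('*' :: t) rs = none := by
              cases hsc : scanName ('*' :: t) rs with
              | none => rfl
              | some v =>
                exfalso
                obtain ⟨he, -, -⟩ :=
                  scanName_some_partition rs ('*' :: t) v.1 v.2.1 v.2.2 hsc
                rw [hqn] at he
                cases he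
            rw [scanName_cons_star] at hscn
            have hscn2 : scanName t rs = none := by
              cases hsc : scanName t rs with
              | none => rfl
              | some v => rw [hsc] at hscn; cases hscn
            rw [hscn2]
            rw [tokF_case_some_none s fa last p hfc hq]
          | some q =>
            have hqb := findChar_bounds s '}' (p + 1) q hq
            have hqs := findChar_partition_some s '}' (p + 1) q hq
            rw [← hglue] at hqs
            -- scanName on the full piece list must succeed with exactly that partition
            cases hsc : scanName ('*' :: t) rs with
            | none =>
              exfalso
              rw [scanName_none_partition rs ('*' :: t) hsc] at hqs
              cases hqs
            | some v =>
              obtain ⟨n1, a1, r1⟩ := v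
              obtain ⟨he, hlen, hnb⟩ :=
                scanName_some_partition rs ('*' :: t) n1 a1 r1 hsc
              rw [hqs] at he
              simp only [Option.some.injEq, Prod.mk.injEq] at he
              obtain ⟨he1, he2⟩ := he
              have hsc2 := hsc
              rw [scanName_cons_star] at hsc2
              cases hsc3 : scanName t rs with
              | none => rw [hsc3] at hsc2; cases hsc2
              | some w =>
                obtain ⟨n2, a2, r2⟩ := w
                rw [hsc3] at hsc2
                simp only [Option.map_some, Option.some.injEq, Prod.mk.injEq] at hsc2
                obtain ⟨hw1, hw2, hw3⟩ := hsc2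
                subst hw2; subst hw3
                -- the yielded glob name: n1 = '*' :: n2 and n1 = s[p+1:q]
                have hq2 : p + 2 ≤ q := by
                  rcases Nat.lt_or_ge (p + 1) q with h5 | h5
                  · omega
                  · exfalso
                    have : q = p + 1 := by omega
                    subst this
                    have := List.getElem?_eq_getElem hl1
                    rw [hqb.2.2] at this
                    have := Option.some.inj this
                    rw [hx1] at this
                    cases this
                have hsubc : pySub s (p + 1) q = s[p + 1] :: pySub s (p + 2) q := by
                  unfold pySub
                  rw [List.drop_eq_getElem_cons hl1]
                  have he3 : q - (p + 1) = (q - (p + 2)) + 1 := by omega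
                  rw [he3, List.take_succ_cons]
                have hn2 : n2 = pySub s (p + 2) q := by
                  have hcons : ('*' :: n2 : List Char) = pySub s (p + 1) q := by
                    rw [hw1, he1]
                  rw [hsubc, hx1] at hcons
                  exact ((List.cons.injEq _ _ _ _ ▸ hcons).2)
                rw [tokF_case_some_some s fa last p q hfc hq, if_pos hstar]
                -- recurse: next suffix is s.drop (q+1), whose split is a2 :: r2
                obtain ⟨hna, hnrs⟩ := hnb ⟨hnosep _ (by simp), fun x hx => hnosep x (by simp [hx])⟩
                have hnext : pySplit '{' (s.drop (q + 1)) = a2 :: r2 := by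
                  rw [he2, pySplit_of_glue '{' r2 a2 hna hnrs]
                have hrec := ih fb (q + 1) a2 r2 (by omega) (by omega)
                  (by simp only [List.length_cons] at h3; omega) hnext
                rw [hrec, hn2]
        · -- binding piece: part does not start with '*'
          have hhead : ¬ part.head? = some '*' := by
            cases part with
            | nil => simp
            | cons c0 t =>
              intro hcontra
              have hc0 : c0 = '*' := Option.some.inj hcontra
              have hl1 : p + 1 < s.length := by
                have hne : s.drop (p + 1) ≠ [] := by
                  rw [← hglue]; simp
                rw [ne_eq, List.drop_eq_nil_iff] at hne
                omega
              have hdrop1 : s.drop (p + 1) = s[p + 1] :: s.drop (p + 2) :=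
                List.drop_eq_getElem_cons hl1
              have hcc : c0 = s[p + 1] := by
                have h5 := hglue
                rw [hdrop1, List.cons_append] at h5
                exact (List.cons.injEq _ _ _ _ ▸ h5).1
              apply hstar
              rw [List.getElem?_eq_getElem hl1, ← hcc, hc0]
          rw [if_neg hhead]
          simp only
          cases hq : findChar s '}' (p + 1) with
          | none =>
            have hqn := findChar_partition_none s '}' (p + 1) hq
            rw [← hglue] at hqn
            have hscn : scanName part rs = none := by
              cases hsc : scanName part rs with
              | none => rfl
              | some v =>
                exfalso
                obtain ⟨he, -, -⟩ :=
                  scanName_some_partition rs part v.1 v.2.1 v.2.2 hsc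
                rw [hqn] at he
                cases he
            rw [hscn]
            rw [tokF_case_some_none s fa last p hfc hq]
          | some q =>
            have hqb := findChar_bounds s '}' (p + 1) q hq
            have hqs := findChar_partition_some s '}' (p + 1) q hq
            rw [← hglue] at hqs
            cases hsc : scanName part rs with
            | none =>
              exfalso
              rw [scanName_none_partition rs part hsc] at hqs
              cases hqs
            | some v =>
              obtain ⟨n1, a1, r1⟩ := v
              obtain ⟨he, hlen, hnb⟩ :=
                scanName_some_partition rs part n1 a1 r1 hsc
              rw [hqs] at he
              simp only [Option.some.injEq, Prod.mk.injEq] at he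
              obtain ⟨he1, he2⟩ := he
              rw [tokF_case_some_some s fa last p q hfc hq, if_neg hstar]
              obtain ⟨hna, hnrs⟩ := hnb ⟨hnosep _ (by simp), fun x hx => hnosep x (by simp [hx])⟩
              have hnext : pySplit '{' (s.drop (q + 1)) = a1 :: r1 := by
                rw [he2, pySplit_of_glue '{' r1 a1 hna hnrs]
              have hrec := ih fb (q + 1) a1 r1 (by omega) (by omega)
                (by simp only [List.length_cons] at h3; omega) hnext
              rw [hrec, he1]

-- ===== VERDICT (by name: the statement is the Claim_ definition above) =====
theorem tokenize_route_template_spec : Claim_equal_tokenize_route_template := by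
  intro template _ _
  unfold Spec_tokenize_route_template tokenize_route_template tokenize_route_template_alt
  cases hsp : pySplit '{' template.toList with
  | nil => exact absurd hsp (pySplit_ne_nil '{' _)
  | cons chunk rest =>
    rw [tokA_eq_tokF template.toList (template.toList.length + 1)
      (template.toList.length + 1) 0 0 (le_refl 0) (Nat.zero_le _) (by omega) (by omega)
      (by omega)]
    exact tokF_eq_tokBLoop template.toList (template.toList.length + 1) (rest.length + 1) 0
      chunk rest (Nat.zero_le _) (by omega) (by omega) (by simpa using hsp)
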